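-- pv_equiv track=rewrite | github.com/Naoking55/telop01 | compare_same_size_styles.py | find_difference_regions
-- ===== SOURCE A (Python) =====
-- def find_difference_regions(bin1, bin2):
--     """差分領域を検出"""
--     if len(bin1) != len(bin2):
--         return []
--
--     differences = []
--     i = 0
--     while i < len(bin1):
--         if bin1[i] != bin2[i]:
--             start = i
--             while i < len(bin1) and bin1[i] != bin2[i]:
--                 i += 1
--             end = i
--             differences.append((start, end))
--         else:
--             i += 1
--
--     return differences
-- ===== SOURCE B (Python) =====
-- def find_difference_regions(bin1, bin2):
--     """差分領域を検出"""
--     if len(bin1) != len(bin2):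
--         return []
--
--     # Edge detection: a region starts at a rising edge of the differs mask and
--     # ends just after a falling edge; pair the k-th start with the k-th end.
--     d = [x != y for x, y in zip(bin1, bin2)]
--     prev = [False] + d[:-1]
--     nxt = d[1:] + [False]
--     starts = [i for i, (f, p) in enumerate(zip(d, prev)) if f and not p]
--     ends = [i + 1 for i, (f, q) in enumerate(zip(d, nxt)) if f and not q]
--     return list(zip(starts, ends))
-- ===== Notes on version B (the rewrite author's own statement) =====
-- stated objective: alternative
-- what changed: Replaced A's manual nested while-loops (outer index scan with an inner run-consuming loop) by edge detection: build the differs mask and its two shifts, collect rising-edge starts and falling-edge ends in two independent comprehensions, and zip the two lists into regions.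
import Mathlib
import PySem

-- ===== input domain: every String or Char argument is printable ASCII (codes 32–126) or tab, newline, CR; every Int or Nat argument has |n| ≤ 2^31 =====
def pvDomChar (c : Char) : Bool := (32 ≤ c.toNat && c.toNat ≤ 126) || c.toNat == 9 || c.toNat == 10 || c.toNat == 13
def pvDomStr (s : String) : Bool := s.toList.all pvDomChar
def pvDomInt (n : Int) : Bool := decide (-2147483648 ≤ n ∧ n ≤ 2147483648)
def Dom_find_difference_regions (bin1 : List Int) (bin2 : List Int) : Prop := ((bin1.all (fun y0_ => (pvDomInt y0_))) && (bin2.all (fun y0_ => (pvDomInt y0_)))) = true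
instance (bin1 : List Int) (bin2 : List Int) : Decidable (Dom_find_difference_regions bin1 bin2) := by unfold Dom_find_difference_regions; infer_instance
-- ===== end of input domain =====

-- B replaces A's run-scanning nested while-loops by edge detection on a differs mask:
-- it builds the mask and its two shifts, collects rising-edge starts and falling-edge
-- ends in two independent comprehensions, and zips them (alternative decomposition; same cost).

-- ===== PORT A =====
-- inner while loop: 'while i < len(bin1) and bin1[i] != bin2[i]: i += 1', returns the final i
def innerA (bin1 bin2 : List Int) (i : Nat) : Nat :=
  if i < bin1.length && (PySem.List.pyGet? bin1 (i : Int) != PySem.List.pyGet? bin2 (i : Int)) then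
    innerA bin1 bin2 (i + 1)
  else i
termination_by bin1.length - i
decreasing_by simp_all; omega

-- the inner loop never moves i backwards (needed for the outer loop's termination)
theorem innerA_ge (bin1 bin2 : List Int) (i : Nat) : i ≤ innerA bin1 bin2 i := by
  fun_induction innerA with
  | case1 i h ih => omega
  | case2 i h => omega

-- outer while loop: 'while i < len(bin1): …'
def loopA (bin1 bin2 : List Int) (i : Nat) : List (Int × Int) :=
  if _h : i < bin1.length then
    if PySem.List.pyGet? bin1 (i : Int) != PySem.List.pyGet? bin2 (i : Int) then
      let e := innerA bin1 bin2 (i + 1)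
      ((i : Int), (e : Int)) :: loopA bin1 bin2 e
    else loopA bin1 bin2 (i + 1)
  else []
termination_by bin1.length - i
decreasing_by
  · have := innerA_ge bin1 bin2 (i + 1); omega
  · omega

def find_difference_regions (bin1 : List Int) (bin2 : List Int) : List (Int × Int) :=
  if bin1.length ≠ bin2.length then []
  else loopA bin1 bin2 0

-- ===== PORT B =====
def find_difference_regions_alt (bin1 : List Int) (bin2 : List Int) : List (Int × Int) :=
  if bin1.length ≠ bin2.length then []
  else
    let d := (bin1.zip bin2).map (fun p => p.1 != p.2)
    let prev := [false] ++ PySem.List.slice d none (some (-1))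
    let nxt := PySem.List.slice d (some 1) none ++ [false]
    let starts := ((PySem.List.enumerate (d.zip prev)).filter
        (fun x => x.2.1 && !x.2.2)).map (fun x => x.1)
    let ends := ((PySem.List.enumerate (d.zip nxt)).filter
        (fun x => x.2.1 && !x.2.2)).map (fun x => x.1 + 1)
    starts.zip ends

-- ===== PRECONDITION & SPEC =====
def Spec_find_difference_regions (bin1 : List Int) (bin2 : List Int) (out : List (Int × Int)) : Prop := out = find_difference_regions_alt bin1 bin2
instance (bin1 : List Int) (bin2 : List Int) (out : List (Int × Int)) : Decidable (Spec_find_difference_regions bin1 bin2 out) := by unfold Spec_find_difference_regions; infer_instance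

-- ===== CLAIM (what is proved, stated in full; the proofs are below) =====
def Claim_equal_find_difference_regions : Prop := ∀ (bin1 : List Int) (bin2 : List Int), Dom_find_difference_regions bin1 bin2 → Spec_find_difference_regions bin1 bin2 (find_difference_regions bin1 bin2)

-- ===== LEMMAS AND PROOFS =====

-- rising-edge starts of the differs mask, as a recursion threading the previous flag
def sA : List Bool → Bool → Int → List Int
  | [], _, _ => []
  | b :: t, p, i => (if b && !p then [i] else []) ++ sA t b (i + 1)

-- falling-edge ends (i+1 at each position whose successor flag is down)
def eA : List Bool → Int → List Int
  | [], _ => []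
  | b :: t, i => (if b && !(t.head?.getD false) then [i + 1] else []) ++ eA t (i + 1)

-- the maximal-true-run view both sides are reduced to
def runs : List Bool → Int → List (Int × Int)
  | [], _ => []
  | b :: t, i =>
      if b then
        ((i, i + 1 + ((t.takeWhile id).length : Int)) ::
          runs (t.dropWhile id) (i + 1 + ((t.takeWhile id).length : Int)))
      else runs t (i + 1)
termination_by d => d.length
decreasing_by
  · simpa using Nat.lt_succ_of_le (List.length_dropWhile_le _ t)
  · simp

theorem sA_true (t : List Bool) (i : Int) :
    sA t true i = sA (t.dropWhile id) false (i + ((t.takeWhile id).length : Int)) := by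
  induction t generalizing i with
  | nil => simp [sA]
  | cons b r ih =>
    cases b with
    | true =>
      simp only [sA, List.takeWhile, List.dropWhile, id]
      rw [ih]
      simp; ring_nf
    | false =>
      simp only [List.takeWhile, List.dropWhile, id]
      simp [sA]

theorem eA_true (t : List Bool) (i : Int) :
    eA (true :: t) i
      = (i + 1 + ((t.takeWhile id).length : Int)) ::
          eA (t.dropWhile id) (i + 1 + ((t.takeWhile id).length : Int)) := by
  induction t generalizing i with
  | nil => simp [eA]
  | cons b r ih =>
    cases b with
    | true =>
      have h1 : eA (true :: true :: r) i = eA (true :: r) (i + 1) := by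
        simp [eA]
      rw [h1, ih,
        List.takeWhile_cons_of_pos (p := id) (by simp),
        List.dropWhile_cons_of_pos (p := id) (by simp)]
      have harg : i + 1 + 1 + ((r.takeWhile id).length : Int)
          = i + 1 + (((true :: r.takeWhile id : List Bool)).length : Int) := by
        simp only [List.length_cons]; push_cast; ring
      rw [harg]
    | false =>
      rw [List.takeWhile_cons_of_neg (p := id) (by simp),
        List.dropWhile_cons_of_neg (p := id) (by simp)]
      simp [eA]

theorem zip_sA_eA (d : List Bool) (i : Int) :
    (sA d false i).zip (eA d i) = runs d i := by
  induction hn : d.length using Nat.strong_induction_on generalizing d i with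
  | _ n ih =>
    cases d with
    | nil => simp [sA, eA, runs]
    | cons b t =>
      cases b with
      | false =>
        have h1 : sA (false :: t) false i = sA t false (i + 1) := by simp [sA]
        have h2 : eA (false :: t) i = eA t (i + 1) := by simp [eA]
        have h3 : runs (false :: t) i = runs t (i + 1) := by simp [runs]
        rw [h1, h2, h3]
        exact ih t.length (by simp [← hn]) t (i + 1) rfl
      | true =>
        have h3 : runs (true :: t) i
            = (i, i + 1 + ((t.takeWhile id).length : Int)) ::
                runs (t.dropWhile id) (i + 1 + ((t.takeWhile id).length : Int)) := by
          simp [runs]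
        have hs : sA (true :: t) false i
            = i :: sA (t.dropWhile id) false (i + 1 + ((t.takeWhile id).length : Int)) := by
          have : sA (true :: t) false i = i :: sA t true (i + 1) := by simp [sA]
          rw [this, sA_true]
        rw [hs, eA_true, h3, List.zip_cons_cons]
        congr 1
        exact ih (t.dropWhile id).length
          (by rw [← hn]; simpa using Nat.lt_succ_of_le (List.length_dropWhile_le _ t))
          (t.dropWhile id) _ rfl

-- l.dropWhile p = l.drop (length of the takeWhile prefix)
theorem dropWhile_eq_drop {α : Type} (p : α → Bool) (l : List α) :
    l.dropWhile p = l.drop (l.takeWhile p).length := by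
  induction l with
  | nil => rfl
  | cons x xs ih =>
    by_cases hx : p x
    · simp [List.dropWhile, List.takeWhile, hx, ih]
    · simp [List.dropWhile, List.takeWhile, hx]

theorem mask_length (bin1 bin2 : List Int) (h : bin1.length = bin2.length) :
    ((bin1.zip bin2).map (fun p => p.1 != p.2)).length = bin1.length := by
  simp [h]

theorem mask_drop_cons (bin1 bin2 : List Int) (h : bin1.length = bin2.length) (i : Nat)
    (hi : i < bin1.length) :
    ((bin1.zip bin2).map (fun p => p.1 != p.2)).drop i
      = (PySem.List.pyGet? bin1 (i : Int) != PySem.List.pyGet? bin2 (i : Int))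
        :: ((bin1.zip bin2).map (fun p => p.1 != p.2)).drop (i + 1) := by
  have hlen : i < ((bin1.zip bin2).map (fun p => p.1 != p.2)).length := by
    rw [mask_length bin1 bin2 h]; omega
  rw [List.drop_eq_getElem_cons hlen]
  congr 1
  have h1 : PySem.List.pyGet? bin1 (i : Int) = some bin1[i] := by
    simp [PySem.List.pyGet?, PySem.List.pyIdx?, hi]
  have hi2 : i < bin2.length := by omega
  have h2 : PySem.List.pyGet? bin2 (i : Int) = some (bin2[i]'hi2) := by
    simp [PySem.List.pyGet?, PySem.List.pyIdx?, hi2]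
  rw [h1, h2]
  simp only [List.getElem_map, List.getElem_zip]
  rfl

-- A's inner while loop consumes exactly the takeWhile prefix of the mask
theorem innerA_eq (bin1 bin2 : List Int) (h : bin1.length = bin2.length) (i : Nat)
    (hle : i ≤ bin1.length) :
    innerA bin1 bin2 i
      = i + ((((bin1.zip bin2).map (fun p => p.1 != p.2)).drop i).takeWhile id).length := by
  fun_induction innerA with
  | case1 i hc ih =>
    simp only [Bool.and_eq_true, decide_eq_true_eq] at hc
    obtain ⟨hlt, hne⟩ := hc
    rw [mask_drop_cons bin1 bin2 h i hlt, hne,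
      List.takeWhile_cons_of_pos (p := id) (by simp),
      ih (by omega), List.length_cons]
    omega
  | case2 i hc =>
    simp only [Bool.and_eq_true, decide_eq_true_eq, not_and] at hc
    by_cases hlt : i < bin1.length
    · have hne : (PySem.List.pyGet? bin1 (i : Int) != PySem.List.pyGet? bin2 (i : Int)) = false := by
        simpa using hc hlt
      rw [mask_drop_cons bin1 bin2 h i hlt, hne,
        List.takeWhile_cons_of_neg (p := id) (by simp)]
      simp
    · have : i = bin1.length := by omega
      subst this
      rw [List.drop_eq_nil_of_le (le_of_eq (mask_length bin1 bin2 h))]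
      simp

-- A's outer loop from index i computes the runs of the mask from index i
theorem loopA_eq_runs (bin1 bin2 : List Int) (h : bin1.length = bin2.length) (i : Nat)
    (hle : i ≤ bin1.length) :
    loopA bin1 bin2 i
      = runs (((bin1.zip bin2).map (fun p => p.1 != p.2)).drop i) (i : Int) := by
  fun_induction loopA with
  | case1 i hlt hne e ih =>
    rw [mask_drop_cons bin1 bin2 h i hlt, hne]
    have hrun : runs (true :: ((bin1.zip bin2).map (fun p => p.1 != p.2)).drop (i + 1)) (i : Int)
        = ((i : Int), (i : Int) + 1 + (((((bin1.zip bin2).map (fun p => p.1 != p.2)).drop (i + 1)).takeWhile id).length : Int)) ::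
            runs ((((bin1.zip bin2).map (fun p => p.1 != p.2)).drop (i + 1)).dropWhile id)
              ((i : Int) + 1 + (((((bin1.zip bin2).map (fun p => p.1 != p.2)).drop (i + 1)).takeWhile id).length : Int)) := by
      simp [runs]
    rw [hrun]
    have hk := innerA_eq bin1 bin2 h (i + 1) (by omega)
    have hle2 : innerA bin1 bin2 (i + 1) ≤ bin1.length := by
      have htw := List.IsPrefix.length_le
        (List.takeWhile_prefix (l := (((bin1.zip bin2).map (fun p => p.1 != p.2)).drop (i + 1))) (p := id))
      have hd : ((((bin1.zip bin2).map (fun p => p.1 != p.2)).drop (i + 1))).length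
          = bin1.length - (i + 1) := by rw [List.length_drop, mask_length bin1 bin2 h]
      omega
    show ((i : Int), (e : Int)) :: loopA bin1 bin2 e = _
    rw [ih hle2]
    have hdw : (((bin1.zip bin2).map (fun p => p.1 != p.2)).drop (i + 1)).dropWhile id
        = ((bin1.zip bin2).map (fun p => p.1 != p.2)).drop e := by
      rw [dropWhile_eq_drop, List.drop_drop]
      congr 1
      show i + 1 + _ = innerA bin1 bin2 (i + 1)
      omega
    rw [hdw]
    have hcast : ((e : Nat) : Int) = (i : Int) + 1
        + (((((bin1.zip bin2).map (fun p => p.1 != p.2)).drop (i + 1)).takeWhile id).length : Int) := by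
      show ((innerA bin1 bin2 (i + 1) : Nat) : Int) = _
      rw [hk]; push_cast; ring
    rw [hcast]
  | case2 i hlt hne ih =>
    have hne' : (PySem.List.pyGet? bin1 (i : Int) != PySem.List.pyGet? bin2 (i : Int)) = false := by
      simpa using hne
    rw [mask_drop_cons bin1 bin2 h i hlt, hne']
    have hrun : runs (false :: ((bin1.zip bin2).map (fun p => p.1 != p.2)).drop (i + 1)) (i : Int)
        = runs (((bin1.zip bin2).map (fun p => p.1 != p.2)).drop (i + 1)) ((i : Int) + 1) := by
      simp [runs]
    rw [hrun, ih (by omega)]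
    norm_cast
  | case3 i hlt =>
    rw [List.drop_eq_nil_of_le (by rw [mask_length bin1 bin2 h]; omega)]
    simp [runs]

-- B's starts comprehension equals the rising-edge recursion
theorem zip_prev (b : Bool) (t : List Bool) (p : Bool) :
    (b :: t).zip (p :: (b :: t).dropLast) = (b, p) :: t.zip (b :: t.dropLast) := by
  cases t <;> simp

theorem zip_nxt (b : Bool) (t : List Bool) :
    (b :: t).zip (t ++ [false]) = (b, t.head?.getD false) :: t.zip (t.tail ++ [false]) := by
  cases t <;> simp

theorem starts_eq (t : List Bool) (p : Bool) (i : Int) :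
    ((PySem.List.enumerate (t.zip (p :: t.dropLast)) i).filter
        (fun x => x.2.1 && !x.2.2)).map (fun x => x.1) = sA t p i := by
  induction t generalizing p i with
  | nil => simp [sA, PySem.List.enumerate_nil]
  | cons b r ih =>
    rw [zip_prev, PySem.List.enumerate_cons]
    have hunf : sA (b :: r) p i = (if b && !p then [i] else []) ++ sA r b (i + 1) := rfl
    by_cases hb2 : (b && !p) = true
    · rw [List.filter_cons_of_pos (by simpa using hb2), List.map_cons, ih]
      show i :: sA r b (i + 1) = sA (b :: r) p i
      rw [hunf, hb2]
      simp
    · rw [List.filter_cons_of_neg (by simpa using hb2), ih]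
      show sA r b (i + 1) = sA (b :: r) p i
      have hbf : (b && !p) = false := by
        revert hb2; cases (b && !p) <;> simp
      rw [hunf, hbf]
      simp

theorem ends_eq (t : List Bool) (i : Int) :
    ((PySem.List.enumerate (t.zip (t.tail ++ [false])) i).filter
        (fun x => x.2.1 && !x.2.2)).map (fun x => x.1 + 1) = eA t i := by
  induction t generalizing i with
  | nil => simp [eA, PySem.List.enumerate_nil]
  | cons b r ih =>
    have hz : (b :: r).zip ((b :: r).tail ++ [false])
        = (b, r.head?.getD false) :: r.zip (r.tail ++ [false]) := zip_nxt b r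
    rw [hz, PySem.List.enumerate_cons]
    have hunf : eA (b :: r) i
        = (if b && !(r.head?.getD false) then [i + 1] else []) ++ eA r (i + 1) := rfl
    by_cases hb : (b && !(r.head?.getD false)) = true
    · rw [List.filter_cons_of_pos (by simpa using hb), List.map_cons, ih]
      show (i + 1) :: eA r (i + 1) = eA (b :: r) i
      rw [hunf, hb]
      simp
    · rw [List.filter_cons_of_neg (by simpa using hb), ih]
      show eA r (i + 1) = eA (b :: r) i
      have hbf : (b && !(r.head?.getD false)) = false := by
        revert hb; cases (b && !(r.head?.getD false)) <;> simp
      rw [hunf, hbf]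
      simp

-- ===== VERDICT (by name: the statement is the Claim_ definition above) =====
theorem find_difference_regions_spec : Claim_equal_find_difference_regions := by
  intro bin1 bin2 _
  unfold Spec_find_difference_regions find_difference_regions find_difference_regions_alt
  by_cases hlen : bin1.length = bin2.length
  · rw [if_neg (by omega), if_neg (by omega)]
    simp only [PySem.List.slice_to_neg_one, PySem.List.slice_from_one]
    rw [show [false] ++ ((bin1.zip bin2).map (fun p => p.1 != p.2)).dropLast
          = false :: ((bin1.zip bin2).map (fun p => p.1 != p.2)).dropLast from rfl]
    rw [starts_eq, ends_eq, zip_sA_eA]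
    rw [loopA_eq_runs bin1 bin2 hlen 0 (Nat.zero_le _)]
    simp
  · rw [if_pos (by omega), if_pos (by omega)]
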